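-- pv_equiv track=rewrite | github.com/skarrred/pypy | 6.py | machine
-- ===== SOURCE A (Python) =====
-- def machine(seq):
--     onecount = 0
--     for i in seq:
--         if i == '1':
--             onecount +=1
--             if onecount == 3:
--                 return True
--         else:
--             onecount = 0
--     return False
-- ===== SOURCE B (Python) =====
-- def machine(seq):
--     return '111' in ''.join(seq)
-- ===== Notes on version B (the rewrite author's own statement) =====
-- stated objective: idiomatic
-- what changed: Replaces the per-character scan with a reset counter by materializing the string and a single substring containment test '111' in ''.join(seq).
import Mathlib
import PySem

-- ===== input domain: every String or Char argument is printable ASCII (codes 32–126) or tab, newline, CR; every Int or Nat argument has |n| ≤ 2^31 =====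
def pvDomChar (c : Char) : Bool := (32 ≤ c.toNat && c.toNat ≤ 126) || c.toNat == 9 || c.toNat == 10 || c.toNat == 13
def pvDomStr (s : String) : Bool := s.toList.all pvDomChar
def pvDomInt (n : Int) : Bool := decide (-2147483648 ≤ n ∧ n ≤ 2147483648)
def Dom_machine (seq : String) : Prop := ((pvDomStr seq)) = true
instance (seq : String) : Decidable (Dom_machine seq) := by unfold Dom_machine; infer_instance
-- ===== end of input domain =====

-- B replaces A's stateful counter scan by a substring containment test: '111' in ''.join(seq)
-- (idiomatic; same O(n) cost).

-- ===== PORT A =====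
-- A's loop: counter of consecutive '1's, early return at 3.
def machineGo : List Char → Nat → Bool
  | [], _ => false
  | c :: rest, cnt =>
    if c = '1' then
      if cnt + 1 = 3 then true else machineGo rest (cnt + 1)
    else machineGo rest 0

def machine (seq : String) : Bool := machineGo seq.toList 0

-- ===== PORT B =====
-- B: '111' in ''.join(seq); joining the characters of a string gives the string back,
-- and Python's substring 'in' is PySem.Str.isIn.
def machine_alt (seq : String) : Bool := PySem.Str.isIn "111" seq

-- ===== PRECONDITION & SPEC =====
def Spec_machine (seq : String) (out : Bool) : Prop := out = machine_alt seq
instance (seq : String) (out : Bool) : Decidable (Spec_machine seq out) := by unfold Spec_machine; infer_instance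

-- ===== CLAIM (what is proved, stated in full; the proofs are below) =====
def Claim_equal_machine : Prop := ∀ (seq : String), Dom_machine seq → Spec_machine seq (machine seq)

-- ===== LEMMAS AND PROOFS =====

-- A's loop with counter cnt < 3 succeeds iff the remaining (3 - cnt) ones appear right away,
-- or '111' appears somewhere later.
theorem machineGo_iff (l : List Char) : ∀ cnt : Nat, cnt < 3 →
    (machineGo l cnt = true ↔
      (List.replicate (3 - cnt) '1' <+: l ∨ ['1', '1', '1'] <:+: l)) := by
  induction l with
  | nil =>
    intro cnt hcnt
    constructor
    · intro h; simp [machineGo] at h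
    · rintro (h | h)
      · have := h.length_le
        simp at this
        omega
      · have := h.length_le
        simp at this
  | cons c rest ih =>
    intro cnt hcnt
    by_cases hc : c = '1'
    · subst hc
      by_cases h3 : cnt + 1 = 3
      · have hcnt2 : 3 - cnt = 1 := by omega
        simp [machineGo, h3, hcnt2]
      · have hrep : 3 - cnt = (3 - (cnt + 1)) + 1 := by omega
        rw [show machineGo ('1' :: rest) cnt = machineGo rest (cnt + 1) by
              simp [machineGo, h3]]
        rw [ih (cnt + 1) (by omega), hrep, List.replicate_succ,
            List.infix_cons_iff]
        constructor
        · rintro (h | h)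
          · exact Or.inl (List.cons_prefix_cons.mpr ⟨rfl, h⟩)
          · exact Or.inr (Or.inr h)
        · rintro (h | h | h)
          · exact Or.inl (List.cons_prefix_cons.mp h).2
          · -- '111' <+: '1'::rest gives '11' <+: rest, hence rep (3-(cnt+1)) '1' <+: rest
            have h2 : ['1', '1'] <+: rest := (List.cons_prefix_cons.mp h).2
            left
            have hle : 3 - (cnt + 1) ≤ 2 := by omega
            calc List.replicate (3 - (cnt + 1)) '1'
                <+: ['1', '1'] := by
                  refine ⟨List.replicate (2 - (3 - (cnt + 1))) '1', ?_⟩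
                  rw [← List.replicate_add, show 3 - (cnt + 1) + (2 - (3 - (cnt + 1))) = 2 by omega]
                  rfl
              _ <+: rest := h2
          · exact Or.inr h
    · rw [show machineGo (c :: rest) cnt = machineGo rest 0 by simp [machineGo, hc]]
      rw [ih 0 (by omega), List.infix_cons_iff]
      have hnp : ∀ n, 0 < n → ¬ (List.replicate n '1' <+: c :: rest) := by
        intro n hn hpre
        cases n with
        | zero => omega
        | succ m =>
          rw [List.replicate_succ] at hpre
          exact hc (List.cons_prefix_cons.mp hpre).1.symm
      constructor
      · rintro (h | h)
        · exact Or.inr (Or.inr h.isInfix)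
        · exact Or.inr (Or.inr h)
      · rintro (h | h | h)
        · exact absurd h (hnp _ (by omega))
        · exact absurd h (hnp 3 (by omega))
        · exact Or.inr h

-- ===== VERDICT (by name: the statement is the Claim_ definition above) =====
theorem machine_spec : Claim_equal_machine := by
  intro seq _
  unfold Spec_machine machine machine_alt
  have hiff := machineGo_iff seq.toList 0 (by omega)
  simp only [Nat.sub_zero] at hiff
  have h2 : machineGo seq.toList 0 = true ↔ ['1', '1', '1'] <:+: seq.toList := by
    rw [hiff]
    constructor
    · rintro (h | h)
      · exact h.isInfix
      · exact h
    · exact Or.inr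
  rw [Bool.eq_iff_iff, h2, PySem.Str.isIn_iff_infix]
  rfl
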